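-- pv_equiv track=rewrite | github.com/ArthurGrimaud/ORFfinder | myBio.py | coordOrfFinder
-- ===== SOURCE A (Python) =====
-- def coordOrfFinder(startPos,stopPos):
--     """Retourne une liste de coordonnées des orf en fonction des position des
--     codons start et stop
--     arg : startPos : liste des positions des codons start
--           stopPos : liste des positions des condons stop
--     return : liste de tuple des coordonnées
--     """
--     orfCoor = []
--     for start in startPos:
--         oneCoor = ()
--         found = False
--         for stop in stopPos:
--             if start < stop and found == False:
--                 oneCoor = (start+1,stop+3)
--                 orfCoor.append(oneCoor)
--                 found = True
--     return orfCoor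
-- ===== SOURCE B (Python) =====
-- def coordOrfFinder(startPos, stopPos):
--     """Same result as A: for each start (in order), the first stop in stopPos
--     list order with start < stop yields (start+1, stop+3).
--     Faster: only the strictly increasing running maxima of stopPos can ever be
--     a 'first stop greater than start', so build that (sorted) record list once
--     and binary-search it per start."""
--     maxima = []
--     for stop in stopPos:
--         if not maxima or stop > maxima[-1]:
--             maxima.append(stop)
--     orfCoor = []
--     n = len(maxima)
--     for start in startPos:
--         lo, hi = 0, n
--         while lo < hi:
--             mid = (lo + hi) // 2
--             if maxima[mid] <= start:
--                 lo = mid + 1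
--             else:
--                 hi = mid
--         if lo < n:
--             orfCoor.append((start + 1, maxima[lo] + 3))
--     return orfCoor
-- ===== Notes on version B (the rewrite author's own statement) =====
-- stated objective: faster
-- what changed: Replaced the full inner scan of stopPos per start by a once-built strictly-increasing running-maxima record list that is binary-searched per start.
import Mathlib
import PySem

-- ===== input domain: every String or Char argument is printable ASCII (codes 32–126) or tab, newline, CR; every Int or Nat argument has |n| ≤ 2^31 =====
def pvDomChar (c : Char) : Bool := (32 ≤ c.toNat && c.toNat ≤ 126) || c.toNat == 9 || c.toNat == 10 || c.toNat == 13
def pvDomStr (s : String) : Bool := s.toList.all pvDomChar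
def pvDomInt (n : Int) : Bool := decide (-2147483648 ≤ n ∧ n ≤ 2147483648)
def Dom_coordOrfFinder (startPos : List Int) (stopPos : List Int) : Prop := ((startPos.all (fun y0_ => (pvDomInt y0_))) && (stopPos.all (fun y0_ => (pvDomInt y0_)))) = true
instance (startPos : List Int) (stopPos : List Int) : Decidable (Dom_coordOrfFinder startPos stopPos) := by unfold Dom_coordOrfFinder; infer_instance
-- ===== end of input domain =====

-- B replaces A's per-start full scan of stopPos by a once-built running-maxima record list binary-searched per start (faster).


-- ===== PORT A =====
-- inner loop over stopPos: state = (found, orfCoor); 'oneCoor' is a temporary used immediately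
def coordOrfFinder (startPos : List Int) (stopPos : List Int) : List (Int × Int) :=
  startPos.foldl (fun orfCoor start =>
    (stopPos.foldl (fun (st : Bool × List (Int × Int)) stop =>
        if start < stop ∧ st.1 = false then (true, st.2 ++ [(start + 1, stop + 3)]) else st)
      (false, orfCoor)).2) []

-- ===== PORT B =====
-- 'maxima' build loop of Source B: cur = last appended element (none = list empty so far)
def pvMaximaGo (cur : Option Int) : List Int → List Int
  | [] => []
  | stop :: rest =>
    match cur with
    | none => stop :: pvMaximaGo (some stop) rest
    | some c => if c < stop then stop :: pvMaximaGo (some stop) rest else pvMaximaGo (some c) rest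

-- the hand-written bisect_right while-loop of Source B
def pvBisect (arr : List Int) (t : Int) (lo hi : Nat) : Nat :=
  if _h : lo < hi then
    let mid := (lo + hi) / 2
    if arr.getD mid 0 ≤ t then pvBisect arr t (mid + 1) hi
    else pvBisect arr t lo mid
  else lo
termination_by hi - lo
decreasing_by all_goals omega

def coordOrfFinder_alt (startPos : List Int) (stopPos : List Int) : List (Int × Int) :=
  let maxima := pvMaximaGo none stopPos
  let n := maxima.length
  startPos.foldl (fun orfCoor start =>
    let lo := pvBisect maxima start 0 n
    if lo < n then orfCoor ++ [(start + 1, maxima.getD lo 0 + 3)] else orfCoor) []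

-- ===== PRECONDITION & SPEC =====
def Spec_coordOrfFinder (startPos : List Int) (stopPos : List Int) (out : List (Int × Int)) : Prop := out = coordOrfFinder_alt startPos stopPos
instance (startPos : List Int) (stopPos : List Int) (out : List (Int × Int)) : Decidable (Spec_coordOrfFinder startPos stopPos out) := by unfold Spec_coordOrfFinder; infer_instance

-- ===== CLAIM (what is proved, stated in full; the proofs are below) =====
def Claim_equal_coordOrfFinder : Prop := ∀ (startPos : List Int) (stopPos : List Int), Dom_coordOrfFinder startPos stopPos → Spec_coordOrfFinder startPos stopPos (coordOrfFinder startPos stopPos)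

-- ===== LEMMAS AND PROOFS =====

-- A's inner loop, once found, never changes the accumulator
theorem pvA_found (start : Int) (xs : List Int) (acc : List (Int × Int)) :
    (xs.foldl (fun (st : Bool × List (Int × Int)) stop =>
        if start < stop ∧ st.1 = false then (true, st.2 ++ [(start + 1, stop + 3)]) else st)
      (true, acc)) = (true, acc) := by
  induction xs with
  | nil => rfl
  | cons x xs ih => simp [List.foldl_cons, ih]

-- A's inner loop computes: append (start+1, s+3) for the FIRST s in xs with start < s
theorem pvA_inner (start : Int) (xs : List Int) (acc : List (Int × Int)) :
    (xs.foldl (fun (st : Bool × List (Int × Int)) stop =>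
        if start < stop ∧ st.1 = false then (true, st.2 ++ [(start + 1, stop + 3)]) else st)
      (false, acc)).2 =
    (match xs.find? (fun s => start < s) with
     | some s => acc ++ [(start + 1, s + 3)]
     | none => acc) := by
  induction xs generalizing acc with
  | nil => rfl
  | cons x xs ih =>
    by_cases h : start < x
    · simp [List.foldl_cons, List.find?, h, pvA_found]
    · simp [List.foldl_cons, List.find?, h, ih]

-- dropping non-record stops does not change the first element greater than t, as long as t ≥ cur
theorem pvMaxima_find_some (t c : Int) (xs : List Int) (hc : c ≤ t) :
    (pvMaximaGo (some c) xs).find? (fun s => t < s) = xs.find? (fun s => t < s) := by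
  induction xs generalizing c with
  | nil => rfl
  | cons x xs ih =>
    by_cases hcx : c < x
    · by_cases h : t < x
      · simp [pvMaximaGo, hcx, List.find?, h]
      · simp [pvMaximaGo, hcx, List.find?, h, ih x (by omega)]
    · have h : ¬ t < x := by omega
      simp [pvMaximaGo, hcx, List.find?, h, ih c hc]

theorem pvMaxima_find (t : Int) (xs : List Int) :
    (pvMaximaGo none xs).find? (fun s => t < s) = xs.find? (fun s => t < s) := by
  cases xs with
  | nil => rfl
  | cons x xs =>
    by_cases h : t < x
    · simp [pvMaximaGo, List.find?, h]
    · simp [pvMaximaGo, List.find?, h, pvMaxima_find_some t x xs (by omega)]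

-- the running-maxima record list is strictly increasing, and bounded below by cur
theorem pvMaxima_sorted (cur : Option Int) (xs : List Int) :
    (pvMaximaGo cur xs).Pairwise (· < ·) ∧
    (∀ c, cur = some c → ∀ y ∈ pvMaximaGo cur xs, c < y) := by
  induction xs generalizing cur with
  | nil => simp [pvMaximaGo]
  | cons x xs ih =>
    cases cur with
    | none =>
      have h := ih (some x)
      refine ⟨?_, by simp⟩
      simp only [pvMaximaGo]
      exact List.pairwise_cons.2 ⟨h.2 x rfl, h.1⟩
    | some c =>
      by_cases hcx : c < x
      · have h := ih (some x)
        refine ⟨?_, ?_⟩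
        · simp only [pvMaximaGo, if_pos hcx]
          exact List.pairwise_cons.2 ⟨h.2 x rfl, h.1⟩
        · intro c' hc' y hy
          injection hc' with hc'; subst hc'
          simp only [pvMaximaGo, if_pos hcx] at hy
          rcases List.mem_cons.1 hy with rfl | hy
          · exact hcx
          · exact lt_trans hcx (h.2 x rfl y hy)
      · have h := ih (some c)
        refine ⟨?_, ?_⟩
        · simpa [pvMaximaGo, hcx] using h.1
        · intro c' hc' y hy
          injection hc' with hc'; subst hc'
          simp only [pvMaximaGo, if_neg hcx] at hy
          exact h.2 c rfl y hy

-- binary-search invariant: everything left of the result is ≤ t, everything from the result on is > t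
theorem pvBisect_spec (arr : List Int) (t : Int) (hp : arr.Pairwise (· < ·)) :
    ∀ fuel lo hi, hi - lo ≤ fuel → lo ≤ hi → hi ≤ arr.length →
    (∀ i, i < lo → (h : i < arr.length) → arr[i] ≤ t) →
    (∀ i, hi ≤ i → (h : i < arr.length) → t < arr[i]) →
    (∀ i, i < pvBisect arr t lo hi → (h : i < arr.length) → arr[i] ≤ t) ∧
    (∀ i, pvBisect arr t lo hi ≤ i → (h : i < arr.length) → t < arr[i]) ∧
    pvBisect arr t lo hi ≤ arr.length := by
  intro fuel
  induction fuel with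
  | zero =>
    intro lo hi hfuel hlh hlen hlo hhi
    have : lo = hi := by omega
    subst this
    rw [pvBisect]; simp only [lt_irrefl, dite_false]
    exact ⟨hlo, fun i hi' h => hhi i hi' h, by omega⟩
  | succ n ih =>
    intro lo hi hfuel hlh hlen hlo hhi
    rw [pvBisect]
    by_cases hlt : lo < hi
    · simp only [hlt, dite_true]
      have hmid1 : lo ≤ (lo + hi) / 2 := by omega
      have hmid2 : (lo + hi) / 2 < hi := by omega
      have hmidlen : (lo + hi) / 2 < arr.length := by omega
      have hgetD : arr.getD ((lo + hi) / 2) 0 = arr[(lo + hi) / 2] := by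
        simp [List.getD_eq_getElem?_getD, List.getElem?_eq_getElem hmidlen]
      rw [hgetD]
      have hpw := List.pairwise_iff_getElem.1 hp
      by_cases hle : arr[(lo + hi) / 2] ≤ t
      · simp only [hle, if_true]
        refine ih ((lo + hi) / 2 + 1) hi (by omega) (by omega) hlen ?_ hhi
        intro i hi' h
        rcases Nat.lt_succ_iff_lt_or_eq.1 hi' with h2 | h2
        · by_cases h3 : i < lo
          · exact hlo i h3 h
          · exact le_of_lt (lt_of_lt_of_le (hpw i ((lo + hi) / 2) h hmidlen h2) hle)
        · subst h2; exact hle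
      · simp only [hle, if_false]
        refine ih lo ((lo + hi) / 2) (by omega) (by omega) (by omega) hlo ?_
        intro i hi' h
        rcases Nat.lt_or_ge ((lo + hi) / 2) i with h2 | h2
        · exact lt_trans (by omega) (hpw ((lo + hi) / 2) i hmidlen h h2)
        · have : i = (lo + hi) / 2 := by omega
          subst this; omega
    · simp only [hlt, dite_false]
      exact ⟨hlo, fun i hi' h => hhi i (by omega) h, by omega⟩

-- find? on a list whose first r elements are ≤ t and the rest > t is the element at r (if any)
theorem pvFind_char (t : Int) (arr : List Int) (r : Nat)
    (hr : r ≤ arr.length)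
    (hlow : ∀ i, i < r → (h : i < arr.length) → arr[i] ≤ t)
    (hhigh : ∀ i, r ≤ i → (h : i < arr.length) → t < arr[i]) :
    arr.find? (fun s => t < s) = if h : r < arr.length then some arr[r] else none := by
  induction arr generalizing r with
  | nil => simp
  | cons x xs ih =>
    cases r with
    | zero =>
      have : t < x := hhigh 0 (by omega) (by simp)
      simp [List.find?, this]
    | succ k =>
      have hx : ¬ t < x := by
        have := hlow 0 (by omega) (by simp)
        simp at this; omega
      have hrec := ih k (by simpa using hr)
        (fun i hi h => by simpa using hlow (i + 1) (by omega) (by simpa using h))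
        (fun i hi h => by simpa using hhigh (i + 1) (by omega) (by simpa using h))
      simp only [List.find?, hx, decide_false]
      rw [hrec]
      by_cases h : k < xs.length
      · simp [h, Nat.succ_lt_succ h]
      · simp [h]

-- per-start: B's binary-search step equals A's first-match step
theorem pvStep_eq (stopPos : List Int) (start : Int) (acc : List (Int × Int)) :
    (let maxima := pvMaximaGo none stopPos
     let n := maxima.length
     let lo := pvBisect maxima start 0 n
     if lo < n then acc ++ [(start + 1, maxima.getD lo 0 + 3)] else acc) =
    (match stopPos.find? (fun s => start < s) with
     | some s => acc ++ [(start + 1, s + 3)]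
     | none => acc) := by
  have hp := (pvMaxima_sorted none stopPos).1
  set maxima := pvMaximaGo none stopPos with hm
  have hb := pvBisect_spec maxima start hp maxima.length 0 maxima.length (by omega) (by omega)
    (le_refl _) (by omega) (by omega)
  set r := pvBisect maxima start 0 maxima.length with hrdef
  have hfind := pvFind_char start maxima r hb.2.2 hb.1 hb.2.1
  rw [← pvMaxima_find start stopPos, ← hm, hfind]
  show (if r < maxima.length then acc ++ [(start + 1, maxima.getD r 0 + 3)] else acc) = _
  by_cases h : r < maxima.length
  · have hget : maxima.getD r 0 = maxima[r] := by
      simp [List.getD_eq_getElem?_getD, List.getElem?_eq_getElem h]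
    rw [if_pos h, dif_pos h, hget]
  · rw [if_neg h, dif_neg h]

-- ===== VERDICT (by name: the statement is the Claim_ definition above) =====
theorem pvMain (startPos stopPos : List Int) :
    coordOrfFinder startPos stopPos = coordOrfFinder_alt startPos stopPos := by
  unfold coordOrfFinder coordOrfFinder_alt
  induction startPos using List.reverseRecOn with
  | nil => rfl
  | append_singleton xs x ih =>
    rw [List.foldl_append, List.foldl_append, ih]
    simp only [List.foldl_cons, List.foldl_nil]
    rw [pvA_inner, pvStep_eq]

theorem coordOrfFinder_spec : Claim_equal_coordOrfFinder := by
  intro startPos stopPos _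
  exact pvMain startPos stopPos
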